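-- pv_equiv track=rewrite | github.com/abdou-majeed/polar-codes | utils.py | indices_to_indicator
-- ===== SOURCE A (Python) =====
-- def indices_to_indicator(length: int, indices: list[int]) -> list[int]:
--     """Convert a list of 1-based indices to a 0/1 indicator vector.
--
--     Returns a list of length ``length`` where position i-1 is 1 if i
--     appears in ``indices``, and 0 otherwise. Uses 1-based indexing to
--     match Arikan's paper conventions.
--
--     Args:
--         length: The length of the output indicator vector (>= 0).
--         indices: A list of integers, each satisfying 1 <= index <= length.
--
--     Returns:
--         A list of 0s and 1s of the given length.
--
--     Raises:
--         AssertionError: If length < 0 or any index is out of range.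
--
--     Examples:
--         >>> indices_to_indicator(5, [1, 3, 5])
--         [1, 0, 1, 0, 1]
--         >>> indices_to_indicator(4, [2])
--         [0, 1, 0, 0]
--     """
--     assert length >= 0
--     if length == 0:
--         return []
--
--     indicator = [0] * length
--     for index in indices:
--         assert 1 <= index <= length
--         indicator[index - 1] = 1
--
--     return indicator
-- ===== SOURCE B (Python) =====
-- def indices_to_indicator(length: int, indices: list[int]) -> list[int]:
--     """Gather formulation: membership test over output positions."""
--     assert length >= 0
--     if length == 0:
--         return []
--     idx = set(indices)
--     for i in idx:
--         assert 1 <= i <= length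
--     return [1 if i in idx else 0 for i in range(1, length + 1)]
-- ===== Notes on version B (the rewrite author's own statement) =====
-- stated objective: idiomatic
-- what changed: B gathers over output positions with a membership test against a set of the given indices, instead of A's scatter that allocates a zero vector and writes 1 at each index.
import Mathlib
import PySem

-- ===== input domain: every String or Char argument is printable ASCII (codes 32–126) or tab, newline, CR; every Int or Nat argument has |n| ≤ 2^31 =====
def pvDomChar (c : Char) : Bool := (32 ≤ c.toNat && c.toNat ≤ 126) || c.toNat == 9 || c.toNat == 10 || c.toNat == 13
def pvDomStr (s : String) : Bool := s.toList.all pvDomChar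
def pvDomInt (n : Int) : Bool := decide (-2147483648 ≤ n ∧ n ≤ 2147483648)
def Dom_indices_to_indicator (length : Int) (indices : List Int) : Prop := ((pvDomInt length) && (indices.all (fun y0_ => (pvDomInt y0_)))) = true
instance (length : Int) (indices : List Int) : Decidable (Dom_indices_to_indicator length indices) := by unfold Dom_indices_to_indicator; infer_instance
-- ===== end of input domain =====

-- B gathers over output positions with a membership test against a set of the indices,
-- instead of A's scatter into a preallocated zero vector (idiomatic restatement, same cost).

-- ===== PORT A =====
def indices_to_indicator (length : Int) (indices : List Int) : List Int :=
  if length = 0 then []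
  else
    indices.foldl (fun indicator index => PySem.List.pySetD indicator (index - 1) 1)
      (List.replicate length.toNat 0)

-- ===== PORT B =====
def indices_to_indicator_alt (length : Int) (indices : List Int) : List Int :=
  if length = 0 then []
  else
    let idx := PySem.Set.ofList indices
    (PySem.List.pyRange 1 (length + 1) 1).map (fun i => if idx.contains i then 1 else 0)

-- ===== PRECONDITION & SPEC =====
-- Pre_ excludes exactly the inputs where A raises AssertionError: length < 0, or
-- length > 0 with some index outside [1, length] (when length = 0, A returns [] without validating).
def Pre_indices_to_indicator (length : Int) (indices : List Int) : Prop :=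
  0 ≤ length ∧ (length = 0 ∨ ∀ i ∈ indices, 1 ≤ i ∧ i ≤ length)
instance (length : Int) (indices : List Int) : Decidable (Pre_indices_to_indicator length indices) := by unfold Pre_indices_to_indicator; infer_instance
def pvWitness_indices_to_indicator : Int × List Int := (5, [1, 3, 5])

def Spec_indices_to_indicator (length : Int) (indices : List Int) (out : List Int) : Prop := out = indices_to_indicator_alt length indices
instance (length : Int) (indices : List Int) (out : List Int) : Decidable (Spec_indices_to_indicator length indices out) := by unfold Spec_indices_to_indicator; infer_instance

-- ===== CLAIM (what is proved, stated in full; the proofs are below) =====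
def Claim_equal_indices_to_indicator : Prop := ∀ (length : Int) (indices : List Int), Dom_indices_to_indicator length indices → Pre_indices_to_indicator length indices → Spec_indices_to_indicator length indices (indices_to_indicator length indices)

-- ===== LEMMAS AND PROOFS =====

theorem map_getD_range (xs : List Int) :
    (List.range xs.length).map (fun p => xs.getD p 0) = xs := by
  apply List.ext_getElem
  · simp
  · intro n h1 h2
    simp [List.getD_eq_getElem?_getD, List.getElem?_eq_getElem h2]

-- The scatter fold, on any accumulator long enough, yields the membership-gather pointwise.
theorem scatter_eq_gather (indices : List Int) (acc : List Int)
    (h : ∀ i ∈ indices, 1 ≤ i ∧ i ≤ (acc.length : Int)) :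
    indices.foldl (fun indicator index => PySem.List.pySetD indicator (index - 1) 1) acc
      = (List.range acc.length).map
          (fun (p : Nat) => if ((p : Int) + 1) ∈ indices then 1 else acc.getD p 0) := by
  induction indices generalizing acc with
  | nil =>
    simp only [List.foldl_nil]
    exact (map_getD_range acc).symm
  | cons x xs ih =>
    have hx := h x (by simp)
    have hset : PySem.List.pySetD acc (x - 1) 1 = acc.set (x - 1).toNat 1 :=
      PySem.List.pySetD_of_nonneg _ _ (by omega)
    simp only [List.foldl_cons, hset]
    rw [ih _ (by intro i hi; simpa [List.length_set] using h i (List.mem_cons_of_mem _ hi))]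
    simp only [List.length_set]
    apply List.map_congr_left
    intro p hp
    rw [List.mem_range] at hp
    by_cases hmem : ((p : Int) + 1) ∈ xs
    · simp [hmem]
    · by_cases hx1 : ((p : Int) + 1) = x
      · have hpn : (x - 1).toNat = p := by omega
        simp [hx1, hpn, List.getD_eq_getElem?_getD, hp]
      · simp only [hx1, if_false, List.mem_cons, hmem, or_self, List.getD_eq_getElem?_getD]
        rw [List.getElem?_set_ne (by omega)]

-- ===== VERDICT (by name: the statement is the Claim_ definition above) =====
theorem indices_to_indicator_spec : Claim_equal_indices_to_indicator := by
  intro length indices _ hpre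
  unfold Spec_indices_to_indicator indices_to_indicator indices_to_indicator_alt
  obtain ⟨hlen, hrange⟩ := hpre
  by_cases h0 : length = 0
  · simp [h0]
  · have hrange' : ∀ i ∈ indices, 1 ≤ i ∧ i ≤ length := by
      rcases hrange with h | h
      · exact absurd h h0
      · exact h
    simp only [if_neg h0]
    rw [scatter_eq_gather indices (List.replicate length.toNat 0)
      (by intro i hi; have := hrange' i hi; simp; omega)]
    rw [PySem.List.pyRange_one]
    have hlt : (length + 1 - 1).toNat = length.toNat := by omega
    rw [List.map_map, hlt]
    simp only [List.length_replicate]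
    apply List.map_congr_left
    intro p hp
    simp only [Function.comp_apply]
    rw [List.mem_range] at hp
    have : PySem.Set.contains (PySem.Set.ofList indices) (1 + (p : Int)) = true
        ↔ (1 + (p : Int)) ∈ indices := by
      rw [PySem.Set.contains_iff, PySem.Set.mem_ofList]
    by_cases hm : ((p : Int) + 1) ∈ indices
    · simp [hm, show (1 : Int) + p = p + 1 by ring]
    · simp only [hm, if_false]
      rw [if_neg (by rw [this]; rwa [show (1 : Int) + p = p + 1 by ring]),
        List.getD_eq_getElem?_getD]
      simp [hp]
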